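-- pv_equiv track=rewrite | github.com/imeprium/lex_query_decomposition | app/services/legal_chat_service.py | _should_use_decomposition
-- ===== SOURCE A (Python) =====
-- def _should_use_decomposition(question: str) -> bool:
--     """Determine if question should be decomposed"""
--     question_lower = question.lower()
--
--     # Keywords that suggest complex legal questions needing decomposition
--     decomp_keywords = [
--         "what constitutes", "elements of", "requirements for",
--         "how does", "process for", "procedure to", "what are the",
--         "legal framework", "comprehensive analysis", "detailed explanation"
--     ]
--
--     # Check if any decomp keywords are present
--     for keyword in decomp_keywords:
--         if keyword in question_lower:
--             return True
--
--     # Also check question length - longer questions might need decomposition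
--     if len(question) > 100:
--         return True
--
--     return False
-- ===== SOURCE B (Python) =====
-- def _rk_contains(text, pat):
--     # Rabin-Karp: single rolling-hash pass over the text for one pattern
--     n, m = len(text), len(pat)
--     if m > n:
--         return False
--     B, M = 257, (1 << 61) - 1
--     ph = 0
--     for ch in pat:
--         ph = (ph * B + ord(ch)) % M
--     w = list(text[:m])
--     h = 0
--     for ch in w:
--         h = (h * B + ord(ch)) % M
--     pw = pow(B, m - 1, M)
--     if h == ph and w == list(pat):
--         return True
--     for ch in text[m:]:
--         h = ((h - ord(w[0]) * pw) * B + ord(ch)) % M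
--         w.pop(0)
--         w.append(ch)
--         if h == ph and w == list(pat):
--             return True
--     return False
--
--
-- DECOMP_KEYWORDS = (
--     "what constitutes", "elements of", "requirements for",
--     "how does", "process for", "procedure to", "what are the",
--     "legal framework", "comprehensive analysis", "detailed explanation",
-- )
--
--
-- def _should_use_decomposition(question: str) -> bool:
--     """Determine if question should be decomposed"""
--     q = question.lower()
--     return any(_rk_contains(q, k) for k in DECOMP_KEYWORDS) or len(question) > 100
-- ===== Notes on version B (the rewrite author's own statement) =====
-- stated objective: alternative
-- what changed: Replaces each Python substring-membership test by a Rabin-Karp search: per keyword it precomputes a polynomial hash and slides a rolling hash window across the lowered question in one pass, comparing characters only on a hash hit; the length guard on the original string is unchanged.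
import Mathlib
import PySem

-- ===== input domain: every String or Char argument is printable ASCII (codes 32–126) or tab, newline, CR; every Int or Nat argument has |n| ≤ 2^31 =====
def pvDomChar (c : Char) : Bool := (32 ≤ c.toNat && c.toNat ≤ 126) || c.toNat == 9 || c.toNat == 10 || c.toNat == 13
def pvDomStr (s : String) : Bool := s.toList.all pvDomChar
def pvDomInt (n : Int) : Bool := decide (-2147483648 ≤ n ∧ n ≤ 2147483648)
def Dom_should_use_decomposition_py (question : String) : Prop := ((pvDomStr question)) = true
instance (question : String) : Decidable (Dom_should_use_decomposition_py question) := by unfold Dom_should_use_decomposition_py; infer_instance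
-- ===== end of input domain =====

-- B replaces the per-keyword substring-membership tests by Rabin-Karp rolling-hash searches
-- (compare characters only on a hash hit); same return value, no speed claim.

-- ===== PORT A =====
-- A's keyword list, as in the Python source
def pvKeywordsA : List String :=
  ["what constitutes", "elements of", "requirements for",
   "how does", "process for", "procedure to", "what are the",
   "legal framework", "comprehensive analysis", "detailed explanation"]

-- A's for-loop with early return: recurse over the keyword list, 'in' = PySem.Str.isIn
def pvCheckA (question_lower : String) : List String → Bool
  | [] => false
  | k :: rest => if PySem.Str.isIn k question_lower then true else pvCheckA question_lower rest

def should_use_decomposition_py (question : String) : Bool :=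
  let question_lower := PySem.Str.lower question
  if pvCheckA question_lower pvKeywordsA then true
  else if PySem.Str.len question > 100 then true
  else false

-- ===== PORT B =====
-- B's keyword list, as lists of chars (B's Rabin-Karp works on the char sequence)
def pvKeywordsB : List (List Char) :=
  ["what constitutes".toList, "elements of".toList, "requirements for".toList,
   "how does".toList, "process for".toList, "procedure to".toList, "what are the".toList,
   "legal framework".toList, "comprehensive analysis".toList, "detailed explanation".toList]

-- the polynomial-hash accumulation step 'h = (h*B + ord(ch)) % M' of Source B
def pvHM : Int := 2305843009213693951
def pvHB : Int := 257
-- '% M' with the positive constant modulus M: Lean's Int.% agrees with Python's % here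
-- (both give the representative in [0, M)); 'ord(ch)' = the code point = c.toNat, exact
def pvHStep (a : Int) (c : Char) : Int := (a * pvHB + (c.toNat : Int)) % pvHM
-- Source B's 'for ch in …: h = (h*B + ord(ch)) % M' hash loop
def pvHash (l : List Char) : Int := l.foldl pvHStep 0

-- Source B's rolling loop 'for ch in text[m:]': update hash, slide window, verify on hash hit
-- (the '[] => false' arm only makes the pop of w[0] total; Source B never reaches it)
def pvRkLoop (pat : List Char) (ph pw : Int) : List Char → List Char → Int → Bool
  | [], _, _ => false
  | c :: rs, w, h =>
    match w with
    | [] => false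
    | c0 :: wt =>
      let h' := ((h - (c0.toNat : Int) * pw) * pvHB + (c.toNat : Int)) % pvHM
      let w' := wt ++ [c]
      if h' == ph && w' == pat then true else pvRkLoop pat ph pw rs w' h'

-- Source B's _rk_contains
def pvRkContains (text pat : List Char) : Bool :=
  let n := text.length
  let m := pat.length
  if m > n then false
  else
    let ph := pvHash pat
    let w := text.take m
    let h := pvHash w
    let pw := pvHB ^ (m - 1) % pvHM
    if h == ph && w == pat then true
    else pvRkLoop pat ph pw (text.drop m) w h

def should_use_decomposition_py_alt (question : String) : Bool :=
  let q := (PySem.Str.lower question).toList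
  (pvKeywordsB.any fun k => pvRkContains q k) || decide (PySem.Str.len question > 100)

-- ===== PRECONDITION & SPEC =====
def Spec_should_use_decomposition_py (question : String) (out : Bool) : Prop := out = should_use_decomposition_py_alt question
instance (question : String) (out : Bool) : Decidable (Spec_should_use_decomposition_py question out) := by unfold Spec_should_use_decomposition_py; infer_instance

-- ===== CLAIM (what is proved, stated in full; the proofs are below) =====
def Claim_equal_should_use_decomposition_py : Prop := ∀ (question : String), Dom_should_use_decomposition_py question → Spec_should_use_decomposition_py question (should_use_decomposition_py question)

-- ===== LEMMAS AND PROOFS =====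

-- A's early-return loop succeeds iff some keyword is an infix of the lowered text
theorem pvCheckA_iff (s : String) (ks : List String) :
    pvCheckA s ks = true ↔ ∃ k ∈ ks, k.toList <:+: s.toList := by
  induction ks with
  | nil => simp [pvCheckA]
  | cons k rest ih =>
    simp only [pvCheckA, List.mem_cons]
    split
    · rename_i h
      simp only [PySem.Str.isIn_iff_infix] at h
      constructor
      · intro _; exact ⟨k, Or.inl rfl, h⟩
      · intro _; rfl
    · rename_i h
      simp only [PySem.Str.isIn_iff_infix] at h
      rw [ih]
      constructor
      · rintro ⟨x, hx, hinf⟩; exact ⟨x, Or.inr hx, hinf⟩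
      · rintro ⟨x, hx, hinf⟩
        rcases hx with rfl | hx
        · exact absurd hinf h
        · exact ⟨x, hx, hinf⟩

-- hashing one more char at the right end is one hash step
theorem pvHash_append_singleton (l : List Char) (c : Char) :
    pvHash (l ++ [c]) = (pvHash l * pvHB + (c.toNat : Int)) % pvHM := by
  simp [pvHash, List.foldl_append, pvHStep]

-- Horner: the hash fold from init a is a·B^len plus the hash from 0, mod M
theorem pvHash_foldl_init (t : List Char) : ∀ a : Int,
    List.foldl pvHStep a t ≡ a * pvHB ^ t.length + pvHash t [ZMOD pvHM] := by
  induction t with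
  | nil => intro a; simp [pvHash]
  | cons c t ih =>
    intro a
    have h1 : List.foldl pvHStep a (c :: t) = List.foldl pvHStep (pvHStep a c) t := rfl
    have h2 : pvHStep a c ≡ a * pvHB + (c.toNat : Int) [ZMOD pvHM] :=
      Int.emod_emod_of_dvd _ dvd_rfl
    have h3 := ih (pvHStep a c)
    have h4 : pvHash (c :: t) ≡ pvHStep 0 c * pvHB ^ t.length + pvHash t [ZMOD pvHM] := ih (pvHStep 0 c)
    have h5 : pvHStep 0 c ≡ (c.toNat : Int) [ZMOD pvHM] := by
      have h6 : pvHStep 0 c ≡ 0 * pvHB + (c.toNat : Int) [ZMOD pvHM] :=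
        Int.emod_emod_of_dvd _ dvd_rfl
      simpa using h6
    calc List.foldl pvHStep a (c :: t)
        ≡ pvHStep a c * pvHB ^ t.length + pvHash t [ZMOD pvHM] := h1 ▸ h3
      _ ≡ (a * pvHB + (c.toNat : Int)) * pvHB ^ t.length + pvHash t [ZMOD pvHM] :=
          Int.ModEq.add_right _ (Int.ModEq.mul_right _ h2)
      _ = a * pvHB ^ (c :: t).length + ((c.toNat : Int) * pvHB ^ t.length + pvHash t) := by
          simp [List.length_cons, pow_succ]; ring
      _ ≡ a * pvHB ^ (c :: t).length + (pvHStep 0 c * pvHB ^ t.length + pvHash t) [ZMOD pvHM] :=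
          Int.ModEq.add_left _ (Int.ModEq.add_right _ (Int.ModEq.mul_right _ h5.symm))
      _ ≡ a * pvHB ^ (c :: t).length + pvHash (c :: t) [ZMOD pvHM] :=
          Int.ModEq.add_left _ h4.symm

-- the rolling update of Source B recomputes the hash of the slid window
theorem pvRoll_eq (c0 : Char) (wt : List Char) (c : Char) :
    ((pvHash (c0 :: wt) - (c0.toNat : Int) * (pvHB ^ wt.length % pvHM)) * pvHB + (c.toNat : Int)) % pvHM
      = pvHash (wt ++ [c]) := by
  rw [pvHash_append_singleton]
  have h5 : pvHStep 0 c0 ≡ (c0.toNat : Int) [ZMOD pvHM] := by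
    have h6 : pvHStep 0 c0 ≡ 0 * pvHB + (c0.toNat : Int) [ZMOD pvHM] :=
      Int.emod_emod_of_dvd _ dvd_rfl
    simpa using h6
  have hc : pvHash (c0 :: wt) ≡ (c0.toNat : Int) * pvHB ^ wt.length + pvHash wt [ZMOD pvHM] :=
    calc pvHash (c0 :: wt) ≡ pvHStep 0 c0 * pvHB ^ wt.length + pvHash wt [ZMOD pvHM] :=
          pvHash_foldl_init wt (pvHStep 0 c0)
      _ ≡ (c0.toNat : Int) * pvHB ^ wt.length + pvHash wt [ZMOD pvHM] :=
          Int.ModEq.add_right _ (Int.ModEq.mul_right _ h5)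
  have hpw : (c0.toNat : Int) * (pvHB ^ wt.length % pvHM) ≡ (c0.toNat : Int) * pvHB ^ wt.length [ZMOD pvHM] :=
    Int.ModEq.mul_left _ (Int.emod_emod_of_dvd _ dvd_rfl)
  have hsub : pvHash (c0 :: wt) - (c0.toNat : Int) * (pvHB ^ wt.length % pvHM)
      ≡ pvHash wt [ZMOD pvHM] := by
    have h7 := Int.ModEq.sub hc hpw
    simpa using h7
  exact Int.ModEq.add_right _ (Int.ModEq.mul_right _ hsub)

-- the verification-free version of Source B's sliding loop: test each slid window directly
def pvNaiveLoop (pat : List Char) : List Char → List Char → Bool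
  | [], _ => false
  | c :: rs, w => (w.tail ++ [c] == pat) || pvNaiveLoop pat rs (w.tail ++ [c])

-- the hash comparison is a pure filter: with the hash invariant, the rolling loop
-- returns exactly what direct window comparison returns
theorem pvRkLoop_eq_naive (pat : List Char) (rs : List Char) : ∀ (w : List Char), w ≠ [] →
    w.length = pat.length →
    pvRkLoop pat (pvHash pat) (pvHB ^ (pat.length - 1) % pvHM) rs w (pvHash w)
      = pvNaiveLoop pat rs w := by
  induction rs with
  | nil => intro w _ _; cases w <;> rfl
  | cons c rs ih =>
    intro w hw hlen
    obtain ⟨c0, wt, rfl⟩ : ∃ c0 wt, w = c0 :: wt := by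
      cases w with
      | nil => exact absurd rfl hw
      | cons a b => exact ⟨a, b, rfl⟩
    have hwt : wt.length = pat.length - 1 := by
      simp only [List.length_cons] at hlen; omega
    have hroll : ((pvHash (c0 :: wt) - (c0.toNat : Int) * (pvHB ^ (pat.length - 1) % pvHM)) * pvHB + (c.toNat : Int)) % pvHM
        = pvHash (wt ++ [c]) := by
      rw [← hwt]; exact pvRoll_eq c0 wt c
    simp only [pvRkLoop, hroll]
    by_cases hpat : wt ++ [c] = pat
    · simp [pvNaiveLoop, hpat]
    · have hne : (pvHash (wt ++ [c]) == pvHash pat && (wt ++ [c] == pat)) = false := by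
        simp [hpat]
      rw [hne]
      simp only [if_neg Bool.false_ne_true]
      rw [ih (wt ++ [c]) (by simp) (by simp only [List.length_append, List.length_cons] at hlen ⊢; simpa using hlen)]
      simp [pvNaiveLoop, hpat]

-- the naive sliding loop finds pat iff pat is some slid window of w along rs
theorem pvNaiveLoop_iff (pat : List Char) (rs : List Char) : ∀ (w : List Char), w ≠ [] →
    (pvNaiveLoop pat rs w = true ↔
      ∃ p, p ≠ [] ∧ p <+: rs ∧ ((w ++ p).drop p.length = pat)) := by
  induction rs with
  | nil =>
    intro w _
    simp only [pvNaiveLoop]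
    constructor
    · intro h; exact absurd h (by simp)
    · rintro ⟨p, hne, hp, _⟩
      exact absurd (List.prefix_nil.mp hp) hne
  | cons c rs ih =>
    intro w hw
    obtain ⟨w0, wt, rfl⟩ : ∃ w0 wt, w = w0 :: wt := by
      cases w with
      | nil => exact absurd rfl hw
      | cons a b => exact ⟨a, b, rfl⟩
    simp only [pvNaiveLoop, Bool.or_eq_true, beq_iff_eq, List.tail_cons]
    rw [ih (wt ++ [c]) (by simp)]
    constructor
    · rintro (h | ⟨p', hne, hp', hdrop⟩)
      · exact ⟨[c], by simp, ⟨rs, rfl⟩, by simpa using h⟩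
      · refine ⟨c :: p', by simp, List.cons_prefix_cons.mpr ⟨rfl, hp'⟩, ?_⟩
        simpa [List.length_cons, List.cons_append, List.drop_succ_cons,
               List.append_assoc] using hdrop
    · rintro ⟨p, hne, hp, hdrop⟩
      cases p with
      | nil => exact absurd rfl hne
      | cons c' p' =>
        obtain ⟨rfl, hp'⟩ := List.cons_prefix_cons.mp hp
        cases p' with
        | nil => left; simpa using hdrop
        | cons d p'' =>
          right
          refine ⟨d :: p'', by simp, hp', ?_⟩
          simpa [List.length_cons, List.cons_append, List.drop_succ_cons,
                 List.append_assoc] using hdrop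

-- Source B's _rk_contains decides infix (for the nonempty patterns it is used on)
theorem pvRkContains_iff (text pat : List Char) (hp : pat ≠ []) :
    pvRkContains text pat = true ↔ pat <:+: text := by
  simp only [pvRkContains]
  by_cases hmn : pat.length > text.length
  · simp only [hmn, if_true]
    constructor
    · intro h; exact absurd h (by simp)
    · intro h
      exact absurd (List.IsInfix.length_le h) (by omega)
  · simp only [hmn, if_false]
    have hmn' : pat.length ≤ text.length := by omega
    have hwlen : (text.take pat.length).length = pat.length := by
      simp [List.length_take]; omega
    have hwne : text.take pat.length ≠ [] := by
      intro h
      have h1 := congrArg List.length h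
      rw [hwlen] at h1
      exact hp (List.eq_nil_of_length_eq_zero h1)
    by_cases hinit : text.take pat.length = pat
    · rw [hinit]
      simp only [beq_self_eq_true, Bool.and_self, if_true, true_iff]
      rw [← hinit]
      exact (List.take_prefix _ _).isInfix
    · have hfalse : (pvHash (text.take pat.length) == pvHash pat
          && (text.take pat.length == pat)) = false := by simp [hinit]
      rw [hfalse]
      simp only [if_neg Bool.false_ne_true]
      rw [pvRkLoop_eq_naive pat (text.drop pat.length) (text.take pat.length) hwne hwlen]
      rw [pvNaiveLoop_iff pat (text.drop pat.length) (text.take pat.length) hwne]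
      constructor
      · rintro ⟨p, hne, hpre, hdrop⟩
        obtain ⟨r, hr⟩ := hpre
        refine ⟨(text.take pat.length ++ p).take p.length, r, ?_⟩
        calc (text.take pat.length ++ p).take p.length ++ pat ++ r
            = ((text.take pat.length ++ p).take p.length
                ++ (text.take pat.length ++ p).drop p.length) ++ r := by
              rw [hdrop, List.append_assoc]
          _ = (text.take pat.length ++ p) ++ r := by rw [List.take_append_drop]
          _ = text := by
              rw [List.append_assoc, hr, List.take_append_drop]
      · rintro ⟨s, t, hst⟩
        have hlens : s.length + pat.length + t.length = text.length := by
          have h1 := congrArg List.length hst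
          simp at h1
          omega
        by_cases hs : s = []
        · exfalso
          apply hinit
          subst hs
          simp only [List.nil_append] at hst
          rw [← hst, List.take_left']
          rfl
        · have hslen : 1 ≤ s.length := by
            cases s with
            | nil => exact absurd rfl hs
            | cons a b => simp
          refine ⟨(text.drop pat.length).take s.length, ?_, List.take_prefix _ _, ?_⟩
          · intro h
            have h1 := congrArg List.length h
            simp only [List.length_take, List.length_drop, List.length_nil] at h1
            omega
          · have hplen : ((text.drop pat.length).take s.length).length = s.length := by
              simp only [List.length_take, List.length_drop]
              omega
            rw [hplen, ← List.take_add, List.drop_take]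
            have hdt : text.drop s.length = pat ++ t := by
              rw [← hst, List.append_assoc, List.drop_left]
            rw [hdt]
            have h2 : pat.length + s.length - s.length = pat.length := by omega
            rw [h2, List.take_left']
            rfl

-- every keyword of B is nonempty
theorem pvKeywordsB_ne_nil : ∀ k ∈ pvKeywordsB, k ≠ [] := by decide

-- B's any-over-keywords succeeds iff some keyword is an infix
theorem pvAnyB_iff (q : List Char) :
    (pvKeywordsB.any fun k => pvRkContains q k) = true ↔ ∃ k ∈ pvKeywordsB, k <:+: q := by
  rw [List.any_eq_true]
  constructor
  · rintro ⟨k, hk, h⟩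
    exact ⟨k, hk, (pvRkContains_iff q k (pvKeywordsB_ne_nil k hk)).mp h⟩
  · rintro ⟨k, hk, h⟩
    exact ⟨k, hk, (pvRkContains_iff q k (pvKeywordsB_ne_nil k hk)).mpr h⟩

-- A's and B's keyword checks agree
theorem pvCheck_eq (s : String) :
    pvCheckA s pvKeywordsA = (pvKeywordsB.any fun k => pvRkContains s.toList k) := by
  rw [Bool.eq_iff_iff, pvCheckA_iff, pvAnyB_iff]
  simp [pvKeywordsA, pvKeywordsB]

-- ===== VERDICT (by name: the statement is the Claim_ definition above) =====
theorem should_use_decomposition_py_spec : Claim_equal_should_use_decomposition_py := by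
  intro question _
  unfold Spec_should_use_decomposition_py should_use_decomposition_py should_use_decomposition_py_alt
  simp only []
  rw [pvCheck_eq]
  cases h : (pvKeywordsB.any fun k => pvRkContains (PySem.Str.lower question).toList k) with
  | true => simp
  | false => simp
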